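-- pv_equiv track=rewrite | github.com/pypi-data/pypi-mirror-371 | packages/microrep/microrep-1.0.0.tar.gz/microrep-1.0.0/src/microrep/core/utils.py | has_valid_multi_joints
-- ===== SOURCE A (Python) =====
-- THUMB="thumb"
--
-- RING="ring"
--
-- COMPLEX = "complex"
--
-- def has_valid_multi_joints(combination) :
--     """
--     Returns true if in the given combination of fingers
--     statuses shows that three or four fingers are correctly joined while being up
--     (This function ensures that the 'complex' annotation is correct)
--     """
--     # If the thumb is a complex, return False
--     if any([finger == THUMB and status == COMPLEX for finger,status in combination]) :
--         return False
--     # If there is less than 3 multi-links, return False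
--     if len([status for finger,status in combination if status == COMPLEX]) < 3 :
--         return False
--     # If both the middle and the ring are multi-links, its true, otherwise return False
--     if any([finger == MIDDLE and status == COMPLEX for finger,status in combination]) and any([finger == RING and status == COMPLEX for finger,status in combination]) :
--         return True
--     return False
--
-- MIDDLE = "middle"
-- ===== SOURCE B (Python) =====
-- THUMB = "thumb"
-- MIDDLE = "middle"
-- RING = "ring"
-- COMPLEX = "complex"
--
-- def has_valid_multi_joints(combination):
--     # single pass maintaining flags and a counter
--     thumb_complex = False
--     complex_count = 0
--     middle_complex = False
--     ring_complex = False
--     for finger, status in combination: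
--         if status == COMPLEX:
--             complex_count += 1
--             if finger == THUMB:
--                 thumb_complex = True
--             elif finger == MIDDLE:
--                 middle_complex = True
--             elif finger == RING:
--                 ring_complex = True
--     if thumb_complex:
--         return False
--     if complex_count < 3:
--         return False
--     return middle_complex and ring_complex
-- ===== Notes on version B (the rewrite author's own statement) =====
-- stated objective: simpler
-- what changed: Replaced A's four separate scans (three any-comprehensions and one filter) by one loop over the combination maintaining a thumb flag, a complex counter, and middle/ring flags, deciding the result from that accumulated state.
import Mathlib
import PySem

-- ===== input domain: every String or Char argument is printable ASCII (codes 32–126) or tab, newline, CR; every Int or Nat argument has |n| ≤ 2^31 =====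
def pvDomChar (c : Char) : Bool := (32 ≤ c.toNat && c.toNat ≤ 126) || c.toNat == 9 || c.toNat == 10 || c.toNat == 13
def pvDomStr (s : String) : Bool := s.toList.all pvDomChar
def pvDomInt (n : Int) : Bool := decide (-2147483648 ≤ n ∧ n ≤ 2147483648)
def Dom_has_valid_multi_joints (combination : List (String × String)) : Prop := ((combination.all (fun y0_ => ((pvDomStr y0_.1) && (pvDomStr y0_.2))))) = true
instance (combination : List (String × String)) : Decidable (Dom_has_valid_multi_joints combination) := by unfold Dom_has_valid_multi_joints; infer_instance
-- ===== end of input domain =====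

-- B replaces A's four separate list scans by one pass maintaining flags and a counter (objective: simpler).

-- ===== PORT A =====
def has_valid_multi_joints (combination : List (String × String)) : Bool :=
  if combination.any (fun p => p.1 == "thumb" && p.2 == "complex") then false
  else if (combination.filter (fun p => p.2 == "complex")).length < 3 then false
  else if combination.any (fun p => p.1 == "middle" && p.2 == "complex") &&
          combination.any (fun p => p.1 == "ring" && p.2 == "complex") then true
  else false

-- ===== PORT B =====
-- state: (thumb_complex, complex_count, middle_complex, ring_complex)
def hvmjStep (st : Bool × Int × Bool × Bool) (p : String × String) : Bool × Int × Bool × Bool :=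
  if p.2 == "complex" then
    if p.1 == "thumb" then (true, st.2.1 + 1, st.2.2.1, st.2.2.2)
    else if p.1 == "middle" then (st.1, st.2.1 + 1, true, st.2.2.2)
    else if p.1 == "ring" then (st.1, st.2.1 + 1, st.2.2.1, true)
    else (st.1, st.2.1 + 1, st.2.2.1, st.2.2.2)
  else st

def has_valid_multi_joints_alt (combination : List (String × String)) : Bool :=
  let st := combination.foldl hvmjStep (false, 0, false, false)
  if st.1 then false
  else if st.2.1 < 3 then false
  else st.2.2.1 && st.2.2.2

-- ===== PRECONDITION & SPEC =====
def Spec_has_valid_multi_joints (combination : List (String × String)) (out : Bool) : Prop := out = has_valid_multi_joints_alt combination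
instance (combination : List (String × String)) (out : Bool) : Decidable (Spec_has_valid_multi_joints combination out) := by unfold Spec_has_valid_multi_joints; infer_instance

-- ===== CLAIM (what is proved, stated in full; the proofs are below) =====
def Claim_equal_has_valid_multi_joints : Prop := ∀ (combination : List (String × String)), Dom_has_valid_multi_joints combination → Spec_has_valid_multi_joints combination (has_valid_multi_joints combination)

-- ===== LEMMAS AND PROOFS =====

theorem hvmj_fold_char (l : List (String × String)) :
    ∀ (t : Bool) (n : Int) (m r : Bool),
    l.foldl hvmjStep (t, n, m, r) =
      (t || l.any (fun p => p.1 == "thumb" && p.2 == "complex"),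
       n + ((l.filter (fun p => p.2 == "complex")).length : Int),
       m || l.any (fun p => p.1 == "middle" && p.2 == "complex"),
       r || l.any (fun p => p.1 == "ring" && p.2 == "complex")) := by
  induction l with
  | nil => intro t n m r; simp
  | cons p l ih =>
    intro t n m r
    simp only [List.foldl_cons, hvmjStep]
    split_ifs with hc h1 h2 h3 <;> rw [ih] <;> clear ih <;>
      simp_all [List.any_cons, Prod.ext_iff, beq_eq_decide] <;>
      omega

theorem has_valid_multi_joints_spec : Claim_equal_has_valid_multi_joints := by
  unfold Claim_equal_has_valid_multi_joints
  intro combination _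
  unfold Spec_has_valid_multi_joints has_valid_multi_joints has_valid_multi_joints_alt
  rw [hvmj_fold_char]
  have hiff : ((0:Int) + ((combination.filter (fun p => p.2 == "complex")).length : Int) < 3)
      ↔ ((combination.filter (fun p => p.2 == "complex")).length < 3) := by omega
  simp only [Bool.false_or, hiff]
  split_ifs with hT hL hMR <;> simp_all
  intro hm a b hab ha hb
  subst ha; subst hb
  exact hMR hm hab
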